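-- pv_equiv track=rewrite | github.com/grasshopperTrainer/coding_practice | baekjoon/accepted/1112 진법 변환.py | solution
-- ===== SOURCE A (Python) =====
-- def solution(X, B):
--     encoded = []
--
--     if 0 < X:
--         if 0 < B:
--             negate = False
--             flip_sign = False
--             amp = 1
--         else:
--             negate = False
--             flip_sign = True
--             amp = 1
--     else:
--         if 0 < B:
--             negate = True
--             flip_sign = False
--             amp = 1
--         else:
--             negate = False
--             flip_sign = True
--             amp = -1
--     B = abs(B)
--     X = abs(X)
--     while X != 0:
--         X, j = divmod(X, B*amp)
--         encoded.append(abs(j))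
--         X = abs(X)
--         if flip_sign:
--             amp *= -1
--
--     if not encoded:
--         return 0
--     else:
--         v = int(''.join(map(str, reversed(encoded))))
--         if negate:
--             v = -v
--         return v
-- ===== SOURCE B (Python) =====
-- def solution(X, B):
--     if X == 0:
--         return 0
--     neg = B > 0 and X < 0
--     if neg:
--         X = -X
--     digits = []
--     while X != 0:
--         r = X % B
--         X = X // B
--         if r < 0:
--             r -= B
--             X += 1
--         digits.append(r)
--     v = int(''.join(map(str, reversed(digits))))
--     return -v if neg else v
-- ===== Notes on version B (the rewrite author's own statement) =====
-- stated objective: simpler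
-- what changed: Replaces A's 8-way sign table with alternating divisor sign (amp *= -1) and per-step abs() by the standard base-conversion loop on the signed value with a single negative-base carry correction (r -= B; X += 1).
import Mathlib
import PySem

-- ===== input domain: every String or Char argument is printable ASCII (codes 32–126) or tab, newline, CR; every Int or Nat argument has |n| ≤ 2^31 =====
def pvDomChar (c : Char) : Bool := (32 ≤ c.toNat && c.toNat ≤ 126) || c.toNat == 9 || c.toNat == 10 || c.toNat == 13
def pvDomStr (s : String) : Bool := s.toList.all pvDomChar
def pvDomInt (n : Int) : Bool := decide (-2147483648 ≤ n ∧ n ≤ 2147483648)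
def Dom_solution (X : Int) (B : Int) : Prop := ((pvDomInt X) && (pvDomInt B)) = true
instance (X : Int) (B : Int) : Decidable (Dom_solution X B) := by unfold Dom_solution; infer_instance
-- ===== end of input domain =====

-- B replaces A's 8-way sign/flip/amp table and alternating-divisor loop by the standard
-- base-conversion loop with a single negative-base carry correction (objective: simpler).

-- ===== PORT A =====
-- A's while loop: X, j = divmod(X, B*amp); encoded.append(abs(j)); X = abs(X); if flip_sign: amp *= -1.
-- The fuel argument only makes the loop total; on Pre_ (|B| >= 2) it never runs out.
def pvLoopA (fuel : Nat) (X Babs amp : Int) (flip : Bool) (enc : List Int) : List Int :=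
  match fuel with
  | 0 => enc
  | f+1 =>
    if X ≠ 0 then
      let q := PySem.Int.floordiv X (Babs * amp)
      let j := PySem.Int.mod X (Babs * amp)
      pvLoopA f |q| Babs (if flip then amp * -1 else amp) flip (enc ++ [|j|])
    else enc
def pvLoopB (fuel : Nat) (X B : Int) (digits : List Int) : List Int :=
  match fuel with
  | 0 => digits
  | f+1 =>
    if X ≠ 0 then
      let r := PySem.Int.mod X B
      let X' := PySem.Int.floordiv X B
      if r < 0 then pvLoopB f (X' + 1) B (digits ++ [r - B])
      else pvLoopB f X' B (digits ++ [r])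
    else digits

def solution (X : Int) (B : Int) : Int :=
  let negate : Bool := if 0 < X then false else (if 0 < B then true else false)
  let flip : Bool := if 0 < X then (if 0 < B then false else true) else (if 0 < B then false else true)
  let amp : Int := if 0 < X then 1 else (if 0 < B then 1 else -1)
  let encoded := pvLoopA (2 * X.natAbs + 2) |X| |B| amp flip []
  if encoded = [] then 0
  else
    let v := (PySem.Int.ofStr? (PySem.Str.join "" ((encoded.reverse).map PySem.Int.toStr))).getD 0
    if negate then -v else v

def solution_alt (X : Int) (B : Int) : Int :=
  if X = 0 then 0
  else
    let neg : Bool := decide (0 < B ∧ X < 0)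
    let X0 : Int := if neg then -X else X
    let digits := pvLoopB (2 * X.natAbs + 2) X0 B []
    let v := (PySem.Int.ofStr? (PySem.Str.join "" ((digits.reverse).map PySem.Int.toStr))).getD 0
    if neg then -v else v


-- ===== PRECONDITION & SPEC =====
-- Pre_ excludes only inputs on which A returns no value: B = 0 with X != 0 (ZeroDivisionError)
-- and B = 1 or B = -1 with X != 0 (A's while loop never terminates).
def Pre_solution (X : Int) (B : Int) : Prop := X = 0 ∨ 2 ≤ B ∨ B ≤ -2
instance (X : Int) (B : Int) : Decidable (Pre_solution X B) := by unfold Pre_solution; infer_instance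
def pvWitness_solution : Int × Int := (10, -2)

def Spec_solution (X : Int) (B : Int) (out : Int) : Prop := out = solution_alt X B
instance (X : Int) (B : Int) (out : Int) : Decidable (Spec_solution X B out) := by unfold Spec_solution; infer_instance

-- ===== CLAIM (what is proved, stated in full; the proofs are below) =====
def Claim_equal_solution : Prop := ∀ (X : Int) (B : Int), Dom_solution X B → Pre_solution X B → Spec_solution X B (solution X B)

-- ===== LEMMAS AND PROOFS =====
theorem pv_fdiv_mod_unique (a d q r : Int) (h : a = d * q + r)
    (hr : (0 < d ∧ 0 ≤ r ∧ r < d) ∨ (d < 0 ∧ d < r ∧ r ≤ 0)) :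
    PySem.Int.floordiv a d = q ∧ PySem.Int.mod a d = r := by
  have hch := PySem.Int.floordiv_mul_add_mod a d
  set q0 := PySem.Int.floordiv a d with hq0
  set r0 := PySem.Int.mod a d with hr0
  have key : d * (q0 - q) = r - r0 := by linear_combination hch + h
  rcases hr with ⟨hd, h0, h1⟩ | ⟨hd, h0, h1⟩
  · have m0 := PySem.Int.mod_nonneg a hd
    have m1 := PySem.Int.mod_lt a hd
    rw [← hr0] at m0 m1
    have hq : q0 = q := by
      rcases lt_trichotomy q0 q with hlt | heq | hgt
      · have : d * (q0 - q) ≤ d * (-1) := by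
          apply mul_le_mul_of_nonneg_left (by omega) (by omega)
        omega
      · exact heq
      · have : d * 1 ≤ d * (q0 - q) := by
          apply mul_le_mul_of_nonneg_left (by omega) (by omega)
        omega
    exact ⟨hq, by rw [hq] at key; omega⟩
  · have m := PySem.Int.mod_neg_bounds a hd
    rw [← hr0] at m
    have hq : q0 = q := by
      rcases lt_trichotomy q0 q with hlt | heq | hgt
      · have : d * (-1) ≤ d * (q0 - q) := by
          apply mul_le_mul_of_nonpos_left (by omega) (by omega)
        omega
      · exact heq
      · have : d * (q0 - q) ≤ d * 1 := by
          apply mul_le_mul_of_nonpos_left (by omega) (by omega)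
        omega
    exact ⟨hq, by rw [hq] at key; omega⟩

theorem pvLoopA_append (f : Nat) : ∀ (X Babs amp : Int) (flip : Bool) (enc : List Int),
    ∃ t, pvLoopA f X Babs amp flip enc = enc ++ t := by
  induction f with
  | zero => intro X Babs amp flip enc; exact ⟨[], by simp [pvLoopA]⟩
  | succ f ih =>
    intro X Babs amp flip enc
    by_cases hX : X = 0
    · exact ⟨[], by simp [pvLoopA, hX]⟩
    · obtain ⟨t, ht⟩ := ih |PySem.Int.floordiv X (Babs * amp)| Babs
        (if flip then -amp else amp) flip (enc ++ [|PySem.Int.mod X (Babs * amp)|])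
      refine ⟨|PySem.Int.mod X (Babs * amp)| :: t, ?_⟩
      simp only [pvLoopA, hX, ne_eq, not_false_iff, if_true, mul_neg_one]
      rw [ht]; simp

theorem pv_pos_loop (f : Nat) : ∀ (X b : Int), 0 ≤ X → 2 ≤ b → ∀ enc,
    pvLoopA f X b 1 false enc = pvLoopB f X b enc := by
  induction f with
  | zero => intro X b _ _ enc; simp [pvLoopA, pvLoopB]
  | succ f ih =>
    intro X b hX hb enc
    by_cases h0 : X = 0
    · simp [pvLoopA, pvLoopB, h0]
    · have hbpos : (0:Int) < b := by omega
      have m0 := PySem.Int.mod_nonneg X hbpos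
      have q0 : 0 ≤ PySem.Int.floordiv X b := by
        rw [PySem.Int.floordiv_eq_ediv_of_pos hbpos]
        exact Int.ediv_nonneg hX (by omega)
      simp only [pvLoopA, pvLoopB, h0, mul_one, if_true, ne_eq,
        not_false_iff, if_neg (by omega : ¬ PySem.Int.mod X b < 0)]
      rw [abs_of_nonneg m0, abs_of_nonneg q0]
      exact ih _ b q0 hb _

theorem pv_neg_loop (f : Nat) : ∀ (Xa b amp : Int), 0 ≤ Xa → 2 ≤ b → (amp = 1 ∨ amp = -1) →
    ∀ enc, pvLoopA f Xa b amp true enc = pvLoopB f (amp * Xa) (-b) enc := by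
  induction f with
  | zero => intro Xa b amp _ _ _ enc; simp [pvLoopA, pvLoopB]
  | succ f ih =>
    intro Xa b amp hXa hb hamp enc
    by_cases h0 : Xa = 0
    · simp [pvLoopA, pvLoopB, h0]
    · have hbpos : (0:Int) < b := by omega
      have hch := PySem.Int.floordiv_mul_add_mod Xa b
      set p := PySem.Int.floordiv Xa b with hp
      set e := PySem.Int.mod Xa b with he
      have e0 := PySem.Int.mod_nonneg Xa hbpos
      have e1 := PySem.Int.mod_lt Xa hbpos
      rw [← he] at e0 e1
      have hppos : 0 ≤ p := by
        rw [hp, PySem.Int.floordiv_eq_ediv_of_pos hbpos]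
        exact Int.ediv_nonneg hXa (by omega)
      rcases hamp with h1 | h1 <;> subst h1
      · -- amp = 1 : A divides Xa by b*1 = b; B's state is Xa, divisor -b
        by_cases hEz : e = 0
        · have hu := pv_fdiv_mod_unique Xa (-b) (-p) 0 (by linarith [hch]) (by right; omega)
          have hA : pvLoopA (f+1) Xa b 1 true enc
              = pvLoopA f p b (-1) true (enc ++ [e]) := by
            simp only [pvLoopA, h0, ne_eq, not_false_iff, if_true, mul_one, mul_neg_one, ← hp, ← he]
            rw [abs_of_nonneg hppos, abs_of_nonneg e0]
          have hB : pvLoopB (f+1) (1 * Xa) (-b) enc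
              = pvLoopB f (-p) (-b) (enc ++ [e]) := by
            simp only [pvLoopB, one_mul, h0, ne_eq, not_false_iff, if_true, hu.1, hu.2]
            rw [if_neg (by omega), hEz]
          have hih := ih p b (-1) hppos hb (Or.inr rfl) (enc ++ [e])
          rw [neg_one_mul] at hih
          rw [hA, hB, hih]
        · have hu := pv_fdiv_mod_unique Xa (-b) (-p - 1) (e - b) (by linarith [hch]) (by right; omega)
          have hA : pvLoopA (f+1) Xa b 1 true enc
              = pvLoopA f p b (-1) true (enc ++ [e]) := by
            simp only [pvLoopA, h0, ne_eq, not_false_iff, if_true, mul_one, mul_neg_one, ← hp, ← he]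
            rw [abs_of_nonneg hppos, abs_of_nonneg e0]
          have hB : pvLoopB (f+1) (1 * Xa) (-b) enc
              = pvLoopB f (-p) (-b) (enc ++ [e]) := by
            simp only [pvLoopB, one_mul, h0, ne_eq, not_false_iff, if_true, hu.1, hu.2]
            rw [if_pos (by omega), show (-p - 1 + 1 : Int) = -p by ring,
              show (e - b - -b : Int) = e by ring]
          have hih := ih p b (-1) hppos hb (Or.inr rfl) (enc ++ [e])
          rw [neg_one_mul] at hih
          rw [hA, hB, hih]
      · -- amp = -1 : A divides Xa by b*(-1) = -b; B's state is -Xa, divisor -b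
        by_cases hEz : e = 0
        · have hu := pv_fdiv_mod_unique Xa (-b) (-p) 0 (by linarith [hch]) (by right; omega)
          have huB := pv_fdiv_mod_unique (-Xa) (-b) p 0 (by linarith [hch]) (by right; omega)
          have hA : pvLoopA (f+1) Xa b (-1) true enc
              = pvLoopA f p b 1 true (enc ++ [0]) := by
            simp only [pvLoopA, h0, ne_eq, not_false_iff, if_true, mul_neg_one, hu.1, hu.2]
            rw [abs_of_nonpos (by omega)]
            simp only [neg_neg, abs_zero]
          have hB : pvLoopB (f+1) (-1 * Xa) (-b) enc
              = pvLoopB f p (-b) (enc ++ [0]) := by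
            simp only [pvLoopB, neg_one_mul, neg_eq_zero, ne_eq, h0, not_false_iff, if_true,
              huB.1, huB.2]
            rw [if_neg (by omega)]
          have hih := ih p b 1 hppos hb (Or.inl rfl) (enc ++ [0])
          rw [one_mul] at hih
          rw [hA, hB, hih]
        · have hu := pv_fdiv_mod_unique Xa (-b) (-p - 1) (e - b) (by linarith [hch]) (by right; omega)
          have huB := pv_fdiv_mod_unique (-Xa) (-b) p (-e) (by linarith [hch]) (by right; omega)
          have hA : pvLoopA (f+1) Xa b (-1) true enc
              = pvLoopA f (p + 1) b 1 true (enc ++ [b - e]) := by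
            simp only [pvLoopA, h0, ne_eq, not_false_iff, if_true, mul_neg_one, hu.1, hu.2]
            rw [abs_of_nonpos (by omega), abs_of_nonpos (by omega),
              show (-(-p - 1) : Int) = p + 1 by ring, show (-(e - b) : Int) = b - e by ring]
            simp only [neg_neg]
          have hB : pvLoopB (f+1) (-1 * Xa) (-b) enc
              = pvLoopB f (p + 1) (-b) (enc ++ [b - e]) := by
            simp only [pvLoopB, neg_one_mul, neg_eq_zero, ne_eq, h0, not_false_iff, if_true,
              huB.1, huB.2]
            rw [if_pos (by omega), show (-e - -b : Int) = b - e by ring]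
          have hih := ih (p + 1) b 1 (by omega) hb (Or.inl rfl) (enc ++ [b - e])
          rw [one_mul] at hih
          rw [hA, hB, hih]

theorem pvLoopA_ne_nil (f : Nat) (hf : f ≠ 0) (X Babs amp : Int) (flip : Bool) (hX : X ≠ 0) :
    pvLoopA f X Babs amp flip [] ≠ [] := by
  obtain ⟨g, rfl⟩ := Nat.exists_eq_succ_of_ne_zero hf
  simp only [pvLoopA, hX, ne_eq, not_false_iff, if_true]
  obtain ⟨t, ht⟩ := pvLoopA_append g |PySem.Int.floordiv X (Babs * amp)| Babs
    (if flip then amp * -1 else amp) flip ([] ++ [|PySem.Int.mod X (Babs * amp)|])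
  rw [ht]; simp


-- ===== VERDICT (by name: the statement is the Claim_ definition above) =====
theorem solution_spec : Claim_equal_solution := by
  intro X B _ hpre
  unfold Spec_solution Pre_solution at *
  by_cases hX : X = 0
  · subst hX
    simp [solution, solution_alt, pvLoopA]
  · have hXne : |X| ≠ 0 := by simpa using hX
    rcases hpre with h | hB | hB
    · exact absurd h hX
    · -- positive base
      have hXa : (0:Int) ≤ |X| := abs_nonneg X
      have hloop := pv_pos_loop (2 * X.natAbs + 2) |X| B hXa hB []
      have hne := pvLoopA_ne_nil (2 * X.natAbs + 2) (by omega) |X| B 1 false hXne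
      rcases lt_trichotomy X 0 with hx | hx | hx
      · have hBpos : (0:Int) < B := by omega
        have habs : |X| = -X := abs_of_neg hx
        simp only [solution, solution_alt, if_neg (by omega : ¬ (0:Int) < X),
          if_pos hBpos, if_neg hX, abs_of_pos hBpos]
        rw [hloop] at hne ⊢
        rw [if_neg hne]
        have hnegb : decide ((0:Int) < B ∧ X < 0) = true := by simp [hBpos, hx]
        rw [hnegb]
        simp [habs]
      · omega
      · have hBpos : (0:Int) < B := by omega
        have habs : |X| = X := abs_of_pos hx
        simp only [solution, solution_alt, if_pos hx, if_pos hBpos, if_neg hX, abs_of_pos hBpos]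
        rw [hloop] at hne ⊢
        rw [if_neg hne]
        have hnegb : decide ((0:Int) < B ∧ X < 0) = false := by simp; omega
        rw [hnegb]
        simp [habs]
    · -- negative base
      have hXa : (0:Int) ≤ |X| := abs_nonneg X
      have hb2 : (2:Int) ≤ -B := by omega
      have hBneg : ¬ (0:Int) < B := by omega
      have habsB : |B| = -B := abs_of_neg (by omega)
      set amp : Int := if 0 < X then 1 else -1 with hampdef
      have hampor : amp = 1 ∨ amp = -1 := by
        rw [hampdef]; split_ifs; exacts [Or.inl rfl, Or.inr rfl]
      have hampX : amp * |X| = X := by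
        rw [hampdef]; rcases lt_trichotomy X 0 with h | h | h
        · rw [if_neg (by omega), abs_of_neg h]; ring
        · exact absurd h hX
        · rw [if_pos h, abs_of_pos h]; ring
      have hloop := pv_neg_loop (2 * X.natAbs + 2) |X| (-B) amp hXa hb2 hampor []
      rw [hampX, neg_neg] at hloop
      have hne := pvLoopA_ne_nil (2 * X.natAbs + 2) (by omega) |X| (-B) amp true hXne
      simp only [solution, solution_alt, if_neg hBneg, if_neg hX, habsB, ite_self, ← hampdef]
      rw [hloop] at hne ⊢
      rw [if_neg hne]
      have hnegb : decide ((0:Int) < B ∧ X < 0) = false := by simp; omega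
      rw [hnegb]
      simp
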